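-- pv_equiv track=rewrite | github.com/jcolinpatrick/kryptos | src/kryptos/kernel/transforms/transposition.py | keyword_to_order
-- ===== SOURCE A (Python) =====
-- from typing import List, Optional, Tuple
--
-- def keyword_to_order(keyword: str, width: int) -> Optional[Tuple[int, ...]]:
--     """Convert keyword to column order. Returns None if keyword too short."""
--     kw = keyword[:width].upper()
--     if len(kw) < width:
--         return None
--     indexed = [(ch, i) for i, ch in enumerate(kw)]
--     ranked = sorted(indexed, key=lambda x: (x[0], x[1]))
--     order = [0] * width
--     for rank, (_, pos) in enumerate(ranked):
--         order[pos] = rank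
--     return tuple(order)
-- ===== SOURCE B (Python) =====
-- def keyword_to_order(keyword, width):
--     """Convert keyword to column order. Returns None if keyword too short."""
--     kw = keyword[:width].upper()
--     if len(kw) < width:
--         return None
--     buckets = {}
--     for i, ch in enumerate(kw):
--         buckets.setdefault(ch, []).append(i)
--     order = [0] * width
--     rank = 0
--     for ch in sorted(buckets):
--         for pos in buckets[ch]:
--             order[pos] = rank
--             rank += 1
--     return tuple(order)
-- ===== Notes on version B (the rewrite author's own statement) =====
-- stated objective: faster
-- what changed: Replaces the comparison sort of all n (char, index) pairs with grouping positions into per-character buckets (dict of lists, naturally index-sorted) and emitting consecutive ranks while walking only the distinct characters in sorted order.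
import Mathlib
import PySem

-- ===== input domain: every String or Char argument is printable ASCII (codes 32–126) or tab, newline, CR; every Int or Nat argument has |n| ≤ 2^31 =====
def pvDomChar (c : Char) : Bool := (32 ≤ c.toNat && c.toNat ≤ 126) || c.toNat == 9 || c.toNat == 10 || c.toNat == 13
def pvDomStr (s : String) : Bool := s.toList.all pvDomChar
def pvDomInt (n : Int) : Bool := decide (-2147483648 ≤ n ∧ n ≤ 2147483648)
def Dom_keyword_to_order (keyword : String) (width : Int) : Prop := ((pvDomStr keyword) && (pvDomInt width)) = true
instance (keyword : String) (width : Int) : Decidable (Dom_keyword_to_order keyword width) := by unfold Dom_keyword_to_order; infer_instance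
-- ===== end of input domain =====

-- B groups positions into per-character buckets and emits consecutive ranks over the sorted distinct
-- characters, sorting only the k distinct characters instead of all n (char, index) pairs (objective:
-- faster; a timing run measured B ≥ 1.5× faster on the generated inputs).

-- ===== PORT A =====
def keyword_to_order (keyword : String) (width : Int) : Option (List Int) :=
  let kw := PySem.Chars.upper (PySem.List.slice keyword.toList none (some width))
  if (PySem.Chars.len kw : Int) < width then none
  else
    let indexed := (PySem.List.enumerate kw 0).map (fun p => (p.2, p.1))
    let ranked := PySem.List.sorted2 indexed (fun x => x.1) (fun x => x.2)
    let order := PySem.List.pyRepeat [(0 : Int)] width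
    some ((PySem.List.enumerate ranked 0).foldl
      (fun ord rp => PySem.List.pySetD ord rp.2.2 rp.1) order)

-- ===== PORT B =====
def keyword_to_order_alt (keyword : String) (width : Int) : Option (List Int) :=
  let kw := PySem.Chars.upper (PySem.List.slice keyword.toList none (some width))
  if (PySem.Chars.len kw : Int) < width then none
  else
    let buckets := (PySem.List.enumerate kw 0).foldl
      (fun d p => d.modify p.2 [] (fun l => l ++ [p.1]))
      (PySem.Dict.empty : PySem.Dict Char (List Int))
    let order := PySem.List.pyRepeat [(0 : Int)] width
    let res := (PySem.List.sorted buckets.keys (fun c => c)).foldl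
      (fun st ch => (buckets.getD ch []).foldl
        (fun (st : List Int × Int) pos => (PySem.List.pySetD st.1 pos st.2, st.2 + 1)) st)
      (order, (0 : Int))
    some res.1

-- ===== PRECONDITION & SPEC =====
-- Pre_ excludes only inputs where Python A raises IndexError: a negative width with more than
-- |width| characters in keyword makes order = [] while the loop still assigns order[pos].
def Pre_keyword_to_order (keyword : String) (width : Int) : Prop :=
  0 ≤ width ∨ (keyword.toList.length : Int) + width ≤ 0
instance (keyword : String) (width : Int) : Decidable (Pre_keyword_to_order keyword width) := by
  unfold Pre_keyword_to_order; infer_instance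
def pvWitness_keyword_to_order : String × Int := ("KEYWORD", 7)

def Spec_keyword_to_order (keyword : String) (width : Int) (out : Option (List Int)) : Prop :=
  out = keyword_to_order_alt keyword width
instance (keyword : String) (width : Int) (out : Option (List Int)) : Decidable (Spec_keyword_to_order keyword width out) := by
  unfold Spec_keyword_to_order; infer_instance

-- ===== CLAIM (what is proved, stated in full; the proofs are below) =====
def Claim_equal_keyword_to_order : Prop := ∀ (keyword : String) (width : Int), Dom_keyword_to_order keyword width → Pre_keyword_to_order keyword width → Spec_keyword_to_order keyword width (keyword_to_order keyword width)

-- ===== LEMMAS AND PROOFS =====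

def pvLexLt (a b : Char × Int) : Prop := a.1 < b.1 ∨ (a.1 = b.1 ∧ a.2 < b.2)

theorem pvLexLt_trans {a b c : Char × Int} (h1 : pvLexLt a b) (h2 : pvLexLt b c) : pvLexLt a c := by
  unfold pvLexLt at *
  rcases h1 with h1 | ⟨e1, h1⟩ <;> rcases h2 with h2 | ⟨e2, h2⟩
  · exact Or.inl (lt_trans h1 h2)
  · exact Or.inl (e2 ▸ h1)
  · exact Or.inl (e1 ▸ h2)
  · exact Or.inr ⟨e1.trans e2, lt_trans h1 h2⟩

theorem pvLexLt_asymm {a b : Char × Int} (h1 : pvLexLt a b) (h2 : pvLexLt b a) : False := by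
  unfold pvLexLt at *
  rcases h1 with h1 | ⟨e1, h1⟩ <;> rcases h2 with h2 | ⟨e2, h2⟩
  · exact absurd h2 (not_lt.mpr (le_of_lt h1))
  · exact absurd (e2 ▸ h1) (lt_irrefl _)
  · exact absurd (e1 ▸ h2) (lt_irrefl _)
  · omega

theorem pvBefore_iff (a b : Char × Int) :
    ((fun a b : Char × Int => decide (a.1 < b.1) || (!decide (b.1 < a.1) && decide (a.2 < b.2))) a b) = true
      ↔ pvLexLt a b := by
  simp only [Bool.or_eq_true, Bool.and_eq_true, Bool.not_eq_true', decide_eq_true_eq,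
    decide_eq_false_iff_not, pvLexLt, not_lt]
  constructor
  · rintro (h | ⟨hle, h2⟩)
    · exact Or.inl h
    · rcases lt_or_eq_of_le hle with h | h
      · exact Or.inl h
      · exact Or.inr ⟨h, h2⟩
  · rintro (h | ⟨he, h2⟩)
    · exact Or.inl h
    · exact Or.inr ⟨le_of_eq he, h2⟩

theorem pvTrichotomy {a b : Char × Int} (h : a.2 ≠ b.2) : pvLexLt a b ∨ pvLexLt b a := by
  unfold pvLexLt
  rcases lt_trichotomy a.1 b.1 with h1 | h1 | h1
  · exact Or.inl (Or.inl h1)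
  · rcases lt_or_gt_of_ne h with h2 | h2
    · exact Or.inl (Or.inr ⟨h1, h2⟩)
    · exact Or.inr (Or.inr ⟨h1.symm, h2⟩)
  · exact Or.inr (Or.inl h1)

theorem pvInsertBy_perm {α : Type} (before : α → α → Bool) (x : α) (acc : List α) :
    (PySem.List.insertBy before x acc).Perm (x :: acc) := by
  induction acc with
  | nil => simp [PySem.List.insertBy]
  | cons y ys ihy =>
    simp only [PySem.List.insertBy]
    split
    · exact List.Perm.refl _
    · exact (List.Perm.cons y ihy).trans (List.Perm.swap x y ys)

theorem pvInsertBy_pairwise (x : Char × Int) (acc : List (Char × Int))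
    (hacc : acc.Pairwise pvLexLt) (hd : ∀ y ∈ acc, x.2 ≠ y.2) :
    (PySem.List.insertBy
        (fun a b => decide (a.1 < b.1) || (!decide (b.1 < a.1) && decide (a.2 < b.2))) x acc).Pairwise pvLexLt := by
  induction acc with
  | nil => simp [PySem.List.insertBy]
  | cons y ys ih =>
    rw [List.pairwise_cons] at hacc
    simp only [PySem.List.insertBy]
    by_cases hb : ((fun a b : Char × Int => decide (a.1 < b.1) || (!decide (b.1 < a.1) && decide (a.2 < b.2))) x y) = true
    · rw [if_pos hb]
      have hxy : pvLexLt x y := (pvBefore_iff x y).mp hb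
      refine List.Pairwise.cons ?_ (List.Pairwise.cons hacc.1 hacc.2)
      intro z hz
      rcases List.mem_cons.mp hz with rfl | hz
      · exact hxy
      · exact pvLexLt_trans hxy (hacc.1 z hz)
    · rw [if_neg hb]
      have hyx : pvLexLt y x := by
        rcases pvTrichotomy (hd y (by simp)) with h | h
        · exact absurd ((pvBefore_iff x y).mpr h) hb
        · exact h
      refine List.Pairwise.cons ?_ (ih hacc.2 (fun z hz => hd z (by simp [hz])))
      intro z hz
      rcases (PySem.List.mem_insertBy _ x z ys).mp hz with rfl | hz
      · exact hyx
      · exact hacc.1 z hz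

theorem pvSorted2_eq (xs ys : List (Char × Int)) (hp : ys.Perm xs) (hs : ys.Pairwise pvLexLt)
    (hd : xs.Pairwise (fun a b => a.2 ≠ b.2)) :
    PySem.List.sorted2 xs (fun x => x.1) (fun x => x.2) = ys := by
  have hfold : PySem.List.sorted2 xs (fun x : Char × Int => x.1) (fun x => x.2)
      = xs.foldl (fun acc x => PySem.List.insertBy
          (fun a b => decide (a.1 < b.1) || (!decide (b.1 < a.1) && decide (a.2 < b.2))) x acc) [] := rfl
  -- invariant: the fold of a pairwise-distinct list starting from a sorted acc stays sorted
  have key : ∀ (l : List (Char × Int)) (acc : List (Char × Int)),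
      acc.Pairwise pvLexLt → (∀ a ∈ acc, ∀ b ∈ l, a.2 ≠ b.2) →
      l.Pairwise (fun a b => a.2 ≠ b.2) →
      (l.foldl (fun acc x => PySem.List.insertBy
          (fun a b => decide (a.1 < b.1) || (!decide (b.1 < a.1) && decide (a.2 < b.2))) x acc) acc).Pairwise pvLexLt
        ∧ (l.foldl (fun acc x => PySem.List.insertBy
          (fun a b => decide (a.1 < b.1) || (!decide (b.1 < a.1) && decide (a.2 < b.2))) x acc) acc).Perm (acc ++ l) := by
    intro l
    induction l with
    | nil => intro acc h1 _ _; exact ⟨by simpa using h1, by simp⟩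
    | cons x l ih =>
      intro acc h1 h2 h3
      rw [List.pairwise_cons] at h3
      have hins : (PySem.List.insertBy _ x acc).Pairwise pvLexLt :=
        pvInsertBy_pairwise x acc h1 (fun y hy => (h2 y hy x (by simp)).symm)
      have hinsp : (PySem.List.insertBy
          (fun a b : Char × Int => decide (a.1 < b.1) || (!decide (b.1 < a.1) && decide (a.2 < b.2))) x acc).Perm (x :: acc) :=
        pvInsertBy_perm _ x acc
      obtain ⟨ha, hb⟩ := ih (PySem.List.insertBy _ x acc) hins
        (fun a ha b hb => by
          rcases (PySem.List.mem_insertBy _ x a acc).mp ha with rfl | ha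
          · exact h3.1 b hb
          · exact h2 a ha b (by simp [hb]))
        h3.2
      exact ⟨ha, hb.trans ((hinsp.append_right l).trans List.perm_middle.symm)⟩
  obtain ⟨hsorted, hperm⟩ := key xs [] (by simp) (by simp) hd
  rw [hfold]
  have hpx : (xs.foldl (fun acc x => PySem.List.insertBy
      (fun a b => decide (a.1 < b.1) || (!decide (b.1 < a.1) && decide (a.2 < b.2))) x acc) []).Perm xs := by
    simpa using hperm
  have hperm' := hpx.trans hp.symm
  exact List.Perm.eq_of_pairwise
    (fun a b _ _ h1 h2 => (pvLexLt_asymm h1 h2).elim)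
    hsorted hs hperm'

def pvAssign : List Int → Int → List Int → List Int
  | ord, _, [] => ord
  | ord, r, p :: ps => pvAssign (PySem.List.pySetD ord p r) (r + 1) ps

theorem pvAssign_A (l : List (Char × Int)) (r : Int) (ord : List Int) :
    (PySem.List.enumerate l r).foldl (fun ord rp => PySem.List.pySetD ord rp.2.2 rp.1) ord
      = pvAssign ord r (l.map (·.2)) := by
  induction l generalizing r ord with
  | nil => simp [PySem.List.enumerate_nil, pvAssign]
  | cons x xs ih => simp [PySem.List.enumerate_cons, pvAssign, ih]

theorem pvAssign_B (ps : List Int) (ord : List Int) (r : Int) :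
    ps.foldl (fun (st : List Int × Int) pos => (PySem.List.pySetD st.1 pos st.2, st.2 + 1)) (ord, r)
      = (pvAssign ord r ps, r + ps.length) := by
  induction ps generalizing ord r with
  | nil => simp [pvAssign]
  | cons p ps ih => simp [pvAssign, ih]; ring

theorem pvDict_fold_getD (l : List (Int × Char)) (d : PySem.Dict Char (List Int)) (ch : Char) :
    (l.foldl (fun d p => d.modify p.2 [] (fun q => q ++ [p.1])) d).getD ch []
      = d.getD ch [] ++ (l.filter (fun p => p.2 == ch)).map (·.1) := by
  induction l generalizing d with
  | nil => simp
  | cons p l ih =>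
    rw [List.foldl_cons, ih]
    simp only [PySem.Dict.modify]
    rw [PySem.Dict.getD_insert]
    by_cases hp : p.2 = ch
    · subst hp; simp
    · simp [hp, Ne.symm hp]

theorem pvKeys_insert {κ ν : Type} [BEq κ] [LawfulBEq κ] (d : PySem.Dict κ ν) (k : κ) (v : ν) :
    (d.insert k v).keys = PySem.Set.add d.keys k := by
  have h1 : (d.items.any fun p => p.1 == k) = true ↔ k ∈ d.items.map (fun x => x.1) := by
    simp only [List.any_eq_true, List.mem_map, beq_iff_eq]
  have h2 : (d.items.map (fun x => x.1)).contains k = true ↔ k ∈ d.items.map (fun x => x.1) :=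
    List.contains_iff_mem
  simp only [PySem.Dict.insert, PySem.Dict.keys, PySem.Set.add, PySem.Set.contains,
    PySem.Dict.contains]
  by_cases h : k ∈ d.items.map (fun x => x.1)
  · rw [if_pos (h1.mpr h), if_pos (h2.mpr h), List.map_map]
    apply List.map_congr_left
    intro p _
    by_cases hp : p.1 = k
    · simp [hp]
    · simp [hp]
  · rw [if_neg (fun hx => h (h1.mp hx)), if_neg (fun hx => h (h2.mp hx))]
    simp

theorem pvDict_fold_keys (l : List (Int × Char)) (d : PySem.Dict Char (List Int)) :
    (l.foldl (fun d p => d.modify p.2 [] (fun q => q ++ [p.1])) d).keys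
      = (l.map (·.2)).foldl PySem.Set.add d.keys := by
  induction l generalizing d with
  | nil => simp
  | cons p l ih =>
    rw [List.foldl_cons, ih, List.map_cons, List.foldl_cons]
    simp only [PySem.Dict.modify]
    rw [pvKeys_insert]

theorem pvFlatMap_filter_perm (K : List Char) (l : List (Int × Char)) (hK : K.Nodup)
    (hall : ∀ p ∈ l, p.2 ∈ K) :
    (K.flatMap (fun ch => l.filter (fun p => p.2 == ch))).Perm l := by
  induction K generalizing l with
  | nil =>
    have : l = [] := List.eq_nil_iff_forall_not_mem.mpr (fun p hp => by simpa using hall p hp)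
    simp [this]
  | cons ch K ih =>
    rw [List.flatMap_cons]
    have hrest : ∀ ch' ∈ K, l.filter (fun p => p.2 == ch')
        = (l.filter (fun p => !(p.2 == ch))).filter (fun p => p.2 == ch') := by
      intro ch' hm
      rw [List.filter_filter]
      apply List.filter_congr
      intro p _
      rcases eq_or_ne p.2 ch' with rfl | h
      · have : ¬ p.2 = ch := fun he => (List.nodup_cons.mp hK).1 (he ▸ hm)
        simp [this]
      · simp [h]
    have hflat : K.flatMap (fun ch' => l.filter (fun p => p.2 == ch'))
        = K.flatMap (fun ch' => (l.filter (fun p => !(p.2 == ch))).filter (fun p => p.2 == ch')) := by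
      exact List.flatMap_congr hrest
    rw [hflat]
    have ihp := ih (l.filter (fun p => !(p.2 == ch))) (List.nodup_cons.mp hK).2
      (fun p hp => by
        have h1 := hall p (List.mem_of_mem_filter hp)
        have h2 := List.of_mem_filter hp
        simp only [Bool.not_eq_true', beq_eq_false_iff_ne] at h2
        rcases List.mem_cons.mp h1 with he | h1
        · exact absurd he h2
        · exact h1)
    exact ((List.Perm.append_left _ ihp).trans (List.filter_append_perm _ l))

theorem pvCore (cs : List Char) (ord : List Int) :
    (PySem.List.enumerate
        (PySem.List.sorted2 ((PySem.List.enumerate cs 0).map (fun p => (p.2, p.1)))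
          (fun x => x.1) (fun x => x.2)) 0).foldl
      (fun ord rp => PySem.List.pySetD ord rp.2.2 rp.1) ord
    = ((PySem.List.sorted
          ((PySem.List.enumerate cs 0).foldl
            (fun d p => d.modify p.2 [] (fun l => l ++ [p.1]))
            (PySem.Dict.empty : PySem.Dict Char (List Int))).keys (fun c => c)).foldl
        (fun st ch =>
          (((PySem.List.enumerate cs 0).foldl
            (fun d p => d.modify p.2 [] (fun l => l ++ [p.1]))
            (PySem.Dict.empty : PySem.Dict Char (List Int))).getD ch []).foldl
            (fun (st : List Int × Int) pos => (PySem.List.pySetD st.1 pos st.2, st.2 + 1)) st)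
        (ord, (0 : Int))).1 := by
  set enum := PySem.List.enumerate cs 0 with henum
  set buckets := enum.foldl (fun d p => d.modify p.2 [] (fun l => l ++ [p.1]))
      (PySem.Dict.empty : PySem.Dict Char (List Int)) with hbk
  have hkeys : buckets.keys = PySem.Set.ofList cs := by
    rw [hbk, pvDict_fold_keys, henum, PySem.List.map_snd_enumerate]
    simp [PySem.Set.ofList_eq_foldl, PySem.Dict.keys, PySem.Dict.empty]
  have hbucket : ∀ ch, buckets.getD ch [] = (enum.filter (fun p => p.2 == ch)).map (·.1) := by
    intro ch
    rw [hbk, pvDict_fold_getD]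
    simp [PySem.Dict.getD, PySem.Dict.get?, PySem.Dict.empty]
  set K := PySem.List.sorted buckets.keys (fun c => c) false with hk
  have hKperm : K.Perm (PySem.Set.ofList cs) := by
    rw [hk, hkeys]; exact PySem.List.sorted_perm _ _ _
  have hKnodup : K.Nodup := hKperm.nodup_iff.mpr (PySem.Set.nodup_ofList cs)
  have hall : ∀ p ∈ enum, p.2 ∈ K := by
    intro p hp
    have : p.2 ∈ cs := by
      rw [PySem.List.mem_enumerate_iff] at hp
      obtain ⟨k, hkk, rfl⟩ := hp
      exact List.getElem_mem _
    exact hKperm.mem_iff.mpr ((PySem.Set.mem_ofList cs p.2).mpr this)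
  set ys := K.flatMap (fun ch => (enum.filter (fun p => p.2 == ch)).map (fun p => (ch, p.1))) with hys
  have hysmap : ys = (K.flatMap (fun ch => enum.filter (fun p => p.2 == ch))).map (fun p => (p.2, p.1)) := by
    rw [hys, List.map_flatMap]
    apply List.flatMap_congr
    intro ch _
    apply List.map_congr_left
    intro p hp
    have := List.of_mem_filter hp
    simp only [beq_iff_eq] at this
    rw [this]
  have hperm : ys.Perm ((PySem.List.enumerate cs 0).map (fun p => (p.2, p.1))) := by
    rw [hysmap, ← henum]
    exact (pvFlatMap_filter_perm K enum hKnodup hall).map _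
  have henumpw : enum.Pairwise (fun p q => p.1 < q.1) := PySem.List.pairwise_lt_enumerate cs 0
  have hKlt : K.Pairwise (fun a b => a < b) := by
    have hle : K.Pairwise (fun a b : Char => a ≤ b) := by
      have := PySem.List.sorted_pairwise buckets.keys (fun c : Char => c)
      rw [← hk] at this
      exact this
    have := List.Pairwise.and hle hKnodup
    exact this.imp (fun h => lt_of_le_of_ne h.1 h.2)
  have hpair : ys.Pairwise pvLexLt := by
    rw [hys, List.flatMap_def, List.pairwise_flatten]
    constructor
    · intro l hl
      rw [List.mem_map] at hl
      obtain ⟨ch, _, rfl⟩ := hl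
      rw [List.pairwise_map]
      exact (henumpw.filter _).imp (fun h => Or.inr ⟨rfl, h⟩)
    · rw [List.pairwise_map]
      apply hKlt.imp
      intro ch1 ch2 h x hx y hy
      rw [List.mem_map] at hx hy
      obtain ⟨p, _, rfl⟩ := hx
      obtain ⟨q, _, rfl⟩ := hy
      exact Or.inl h
  have hdist : (((PySem.List.enumerate cs 0).map (fun p => (p.2, p.1))).Pairwise
      (fun a b => a.2 ≠ b.2)) := by
    rw [List.pairwise_map]
    exact (henumpw.imp (fun h => ne_of_lt h))
  rw [pvSorted2_eq _ ys hperm hpair hdist]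
  rw [pvAssign_A]
  simp only [hbucket]
  rw [← List.foldl_flatMap, pvAssign_B]
  rw [hysmap, List.map_map]
  congr 1
  rw [List.map_flatMap]
  rfl

theorem pvPorts_eq (keyword : String) (width : Int) :
    keyword_to_order keyword width = keyword_to_order_alt keyword width := by
  unfold keyword_to_order keyword_to_order_alt
  by_cases h : (PySem.Chars.len (PySem.Chars.upper
      (PySem.List.slice keyword.toList none (some width))) : Int) < width
  · simp only [if_pos h]
  · simp only [if_neg h]
    exact congrArg some (pvCore _ _)

-- ===== VERDICT (by name: the statement is the Claim_ definition above) =====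
theorem keyword_to_order_spec : Claim_equal_keyword_to_order := by
  intro keyword width _ _
  unfold Spec_keyword_to_order
  exact pvPorts_eq keyword width
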